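-- pv_equiv track=rewrite | github.com/jsj2024/SafetyAlignment | evaluation/utils/data_loader.py | standardize_data_format
-- ===== SOURCE A (Python) =====
-- from typing import Dict, List, Any, Optional, Union
--
-- def standardize_data_format(
--     data: List[Dict[str, Any]],
--     field_mapping: Dict[str, str]
-- ) -> List[Dict[str, Any]]:
--     """
--     标准化数据格式
--
--     Args:
--         data: 原始数据列表
--         field_mapping: 字段映射 {标准字段名: 原始字段名}
--
--     Returns:
--         标准化后的数据列表
--     """
--     standardized_data = []
--
--     for item in data:
--         standardized_item = {}
--
--         # 应用字段映射
--         for standard_field, original_field in field_mapping.items():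
--             if original_field in item:
--                 standardized_item[standard_field] = item[original_field]
--
--         # 保留未映射的字段
--         for key, value in item.items():
--             if key not in field_mapping.values():
--                 standardized_item[key] = value
--
--         standardized_data.append(standardized_item)
--
--     return standardized_data
-- ===== SOURCE B (Python) =====
-- def standardize_data_format(data, field_mapping):
--     # Invert the mapping once into {original_field: [(position, standard_field), ...]},
--     # then drive a single classifying pass over each item, restoring the mapping's
--     # declared order for the renamed fields by their recorded positions.
--     rev = {}
--     for pos, (standard_field, original_field) in enumerate(field_mapping.items()):
--         rev.setdefault(original_field, []).append((pos, standard_field))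
--     result = []
--     for item in data:
--         renamed = []
--         passthrough = []
--         for key, value in item.items():
--             if key in rev:
--                 for pos, standard_field in rev[key]:
--                     renamed.append((pos, standard_field, value))
--             else:
--                 passthrough.append((key, value))
--         renamed.sort(key=lambda t: t[0])
--         out = {standard_field: value for _, standard_field, value in renamed}
--         out.update(passthrough)
--         result.append(out)
--     return result
-- ===== Notes on version B (the rewrite author's own statement) =====
-- stated objective: faster
-- what changed: B inverts the mapping once into a reverse index {original: [(position, standard)]}, classifies each item's keys in a single pass into renamed vs pass-through pairs, and restores the mapping's declared order by sorting renamed pairs by recorded position, instead of A's per-item pass over the mapping plus a per-key rescan of field_mapping.values(); Pre_ excludes association lists with duplicate keys, which represent no Python dict.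
import Mathlib
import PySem

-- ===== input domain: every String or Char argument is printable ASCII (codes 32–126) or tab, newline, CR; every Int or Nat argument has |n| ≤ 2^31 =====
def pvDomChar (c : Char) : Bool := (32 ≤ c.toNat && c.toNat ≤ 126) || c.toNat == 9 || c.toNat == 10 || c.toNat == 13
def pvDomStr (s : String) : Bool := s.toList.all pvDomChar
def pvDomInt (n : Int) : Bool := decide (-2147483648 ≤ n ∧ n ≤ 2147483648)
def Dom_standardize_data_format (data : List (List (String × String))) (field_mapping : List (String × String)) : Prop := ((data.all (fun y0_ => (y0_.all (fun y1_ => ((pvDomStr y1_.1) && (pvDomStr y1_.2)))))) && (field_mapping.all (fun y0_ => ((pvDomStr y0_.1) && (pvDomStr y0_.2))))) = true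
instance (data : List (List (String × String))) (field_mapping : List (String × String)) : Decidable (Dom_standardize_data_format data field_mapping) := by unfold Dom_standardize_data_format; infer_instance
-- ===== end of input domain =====

-- B inverts the mapping once into a reverse index and classifies each item's keys in a
-- single pass, restoring the mapping's declared order by recorded positions (objective:
-- a different, index-driven algorithm).

-- ===== PORT A =====
-- one item of A: the two loops mutating standardized_item
def pvAItem (field_mapping : List (String × String)) (item : List (String × String)) : List (String × String) :=
  let d1 : PySem.Dict String String :=
    field_mapping.foldl (fun d p =>
      if (PySem.Dict.mk item).contains p.2 then
        d.insert p.1 ((PySem.Dict.mk item).getD p.2 "")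
      else d) PySem.Dict.empty
  let d2 :=
    item.foldl (fun d kv =>
      if !((field_mapping.map Prod.snd).contains kv.1) then d.insert kv.1 kv.2
      else d) d1
  d2.items

def standardize_data_format (data : List (List (String × String))) (field_mapping : List (String × String)) : List (List (String × String)) :=
  data.foldl (fun acc item => acc ++ [pvAItem field_mapping item]) []

-- ===== PORT B =====
-- Source B's reverse index: {original_field: [(position, standard_field), ...]}
-- (setdefault(k, []).append(x) is Dict.modify k [] (· ++ [x]))
def pvRev (field_mapping : List (String × String)) : PySem.Dict String (List (Int × String)) :=
  (PySem.List.enumerate field_mapping).foldl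
    (fun d p => d.modify p.2.2 [] (fun l => l ++ [(p.1, p.2.1)])) PySem.Dict.empty

-- one item of Source B: classify keys in one pass, sort renamed pairs by position,
-- build the dict and update it with the pass-through pairs
def pvBItem (rev : PySem.Dict String (List (Int × String))) (item : List (String × String)) : List (String × String) :=
  let split := item.foldl (fun acc kv =>
      if rev.contains kv.1 then
        (acc.1 ++ (rev.getD kv.1 []).map (fun q => (q.1, (q.2, kv.2))), acc.2)
      else (acc.1, acc.2 ++ [kv]))
    (([] : List (Int × String × String)), ([] : List (String × String)))
  let renamed := PySem.List.sorted split.1 (fun t => t.1)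
  let out := PySem.Dict.ofList (renamed.map (fun t => (t.2.1, t.2.2)))
  (split.2.foldl (fun d kv => d.insert kv.1 kv.2) out).items

def standardize_data_format_alt (data : List (List (String × String))) (field_mapping : List (String × String)) : List (List (String × String)) :=
  let rev := pvRev field_mapping
  data.foldl (fun acc item => acc ++ [pvBItem rev item]) []

-- ===== PRECONDITION & SPEC =====
-- Pre_ excludes data items given as association lists with duplicate keys: such lists
-- do not represent any Python dict input (A's items are dicts, whose keys are unique).
def Pre_standardize_data_format (data : List (List (String × String))) (field_mapping : List (String × String)) : Prop :=
  ∀ item ∈ data, (item.map Prod.fst).Nodup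
instance (data : List (List (String × String))) (field_mapping : List (String × String)) : Decidable (Pre_standardize_data_format data field_mapping) := by unfold Pre_standardize_data_format; infer_instance

def pvWitness_standardize_data_format : (List (List (String × String))) × (List (String × String)) :=
  ([[("question", "1"), ("extra", "2")]], [("prompt", "question")])

def Spec_standardize_data_format (data : List (List (String × String))) (field_mapping : List (String × String)) (out : List (List (String × String))) : Prop := out = standardize_data_format_alt data field_mapping
instance (data : List (List (String × String))) (field_mapping : List (String × String)) (out : List (List (String × String))) : Decidable (Spec_standardize_data_format data field_mapping out) := by unfold Spec_standardize_data_format; infer_instance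

-- ===== CLAIM (what is proved, stated in full; the proofs are below) =====
def Claim_equal_standardize_data_format : Prop := ∀ (data : List (List (String × String))) (field_mapping : List (String × String)), Dom_standardize_data_format data field_mapping → Pre_standardize_data_format data field_mapping → Spec_standardize_data_format data field_mapping (standardize_data_format data field_mapping)

-- ===== LEMMAS AND PROOFS =====

-- (l.filter p).map f as a flatMap of conditional singletons
theorem pv_filter_map_eq_flatMap {α β : Type} (p : α → Bool) (f : α → β) (l : List α) :
    (l.filter p).map f = l.flatMap (fun x => if p x then [f x] else []) := by
  induction l with
  | nil => rfl
  | cons a t ih => simp only [List.filter_cons, List.flatMap_cons, ← ih]; split <;> simp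

-- flatMap of a pointwise append splits, up to permutation
theorem pv_flatMap_append_perm {α β : Type} (l : List α) (f g : α → List β) :
    (l.flatMap (fun x => f x ++ g x)).Perm (l.flatMap f ++ l.flatMap g) := by
  induction l with
  | nil => simp
  | cons a t ih =>
    simp only [List.flatMap_cons]
    refine (ih.append_left (f a ++ g a)).trans ?_
    simp only [List.append_assoc]
    exact (List.perm_append_comm_assoc (g a) (t.flatMap f) (t.flatMap g)).append_left (f a)

-- the two nested flatMaps commute, up to permutation
theorem pv_flatMap_comm_perm {α β γ : Type} (l : List α) (m : List β) (h : α → β → List γ) :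
    (l.flatMap (fun x => m.flatMap (h x))).Perm (m.flatMap (fun y => l.flatMap (fun x => h x y))) := by
  induction l with
  | nil => simp
  | cons a t ih =>
    simp only [List.flatMap_cons]
    refine (ih.append_left (m.flatMap (h a))).trans ?_
    exact (pv_flatMap_append_perm m (h a) (fun y => t.flatMap (fun x => h x y))).symm

theorem pv_getD_mk_cons (k : String) (v : String) (t : List (String × String)) (x d0 : String) :
    (PySem.Dict.mk ((k, v) :: t)).getD x d0 = if k == x then v else (PySem.Dict.mk t).getD x d0 := by
  show ((PySem.Dict.mk ((k, v) :: t)).get? x).getD d0 = _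
  rw [PySem.Dict.get?_mk_cons]
  split <;> rfl

theorem pv_any_eq_contains_map (ps : List (String × String)) (k : String) :
    (ps.any fun p => p.1 == k) = (ps.map Prod.fst).contains k := by
  induction ps with
  | nil => rfl
  | cons q t ih => rw [List.any_cons, List.map_cons, List.contains_cons, ih, Bool.beq_comm]

theorem pv_contains_mk_eq (ps : List (String × String)) (k : String) :
    (PySem.Dict.mk ps).contains k = (ps.map Prod.fst).contains k := by
  rw [PySem.Dict.contains_mk, pv_any_eq_contains_map]

-- the reverse index looked up: all (position, standard) pairs whose original is k, in order
theorem pv_rev_getD (fm : List (String × String)) (k : String) :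
    (pvRev fm).getD k [] =
      ((PySem.List.enumerate fm).filter (fun p => p.2.2 == k)).map (fun p => (p.1, p.2.1)) := by
  unfold pvRev
  have hfold := List.foldl_map (f := fun p : Int × String × String => (p.2.2, (p.1, p.2.1)))
      (g := fun (d : PySem.Dict String (List (Int × String))) (q : String × (Int × String)) => d.modify q.1 [] (fun l => l ++ [q.2]))
      (l := PySem.List.enumerate fm) (init := PySem.Dict.empty)
  rw [← hfold, PySem.Dict.getD_foldl_modify_append, List.filter_map, List.map_map]
  simp [Function.comp_def]

theorem pv_rev_contains (fm : List (String × String)) (k : String) :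
    (pvRev fm).contains k = (fm.map Prod.snd).contains k := by
  unfold pvRev
  rw [PySem.Dict.contains_eq_decide_mem_keys,
    PySem.Dict.keys_foldl_modify_key _ (fun p : Int × String × String => p.2.2) [] (fun _ p => (fun l => l ++ [(p.1, p.2.1)]))]
  have hmap : (PySem.List.enumerate fm).map (fun p => p.2.2) = fm.map Prod.snd := by
    calc (PySem.List.enumerate fm).map (fun p => p.2.2)
        = ((PySem.List.enumerate fm).map (fun p => p.2)).map Prod.snd := by rw [List.map_map]; rfl
      _ = fm.map Prod.snd := by rw [PySem.List.map_snd_enumerate]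
  rw [hmap]
  have hkeys : (PySem.Dict.empty : PySem.Dict String (List (Int × String))).keys = [] := rfl
  rw [hkeys]
  show decide (k ∈ PySem.Set.update [] (fm.map Prod.snd)) = _
  have hupd : PySem.Set.update [] (fm.map Prod.snd) = PySem.Set.ofList (fm.map Prod.snd) := rfl
  rw [hupd]
  simp [PySem.Set.mem_ofList]

-- the single classifying pass, characterised
theorem pv_split_aux (rev : PySem.Dict String (List (Int × String))) (item : List (String × String)) :
    ∀ acc : List (Int × String × String) × List (String × String),
    item.foldl (fun acc kv =>
      if rev.contains kv.1 then
        (acc.1 ++ (rev.getD kv.1 []).map (fun q => (q.1, (q.2, kv.2))), acc.2)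
      else (acc.1, acc.2 ++ [kv])) acc
    = (acc.1 ++ item.flatMap (fun kv => if rev.contains kv.1 then (rev.getD kv.1 []).map (fun q => (q.1, (q.2, kv.2))) else []),
       acc.2 ++ item.filter (fun kv => !rev.contains kv.1)) := by
  induction item with
  | nil => intro acc; simp
  | cons kv t ih =>
    intro acc
    rw [List.foldl_cons, List.flatMap_cons, List.filter_cons]
    by_cases h : rev.contains kv.1
    · simp only [h, if_pos, ih, Bool.not_true]
      simp [List.append_assoc]
    · simp only [Bool.not_eq_true] at h
      simp only [h, Bool.not_false, ih, if_true]
      simp [List.append_assoc]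

-- the per-mapping-entry view of the classifying pass (needs unique item keys)
theorem pv_flatMap_single (item : List (String × String)) (hit : (item.map Prod.fst).Nodup)
    (o : String) (w : Int × String) :
    item.flatMap (fun kv => if o == kv.1 then [(w.1, (w.2, kv.2))] else [])
      = if (PySem.Dict.mk item).contains o then [(w.1, (w.2, (PySem.Dict.mk item).getD o ""))] else [] := by
  induction item with
  | nil => simp
  | cons kv t ih =>
    obtain ⟨k, v⟩ := kv
    rw [List.map_cons] at hit
    obtain ⟨hk, ht⟩ := List.nodup_cons.mp hit
    rw [List.flatMap_cons, ih ht, pv_getD_mk_cons]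
    simp only [pv_contains_mk_eq, List.map_cons, List.contains_cons]
    by_cases h : o = k
    · subst h
      have hct : (t.map Prod.fst).contains o = false := by
        simp only [List.contains_eq_mem, decide_eq_false_iff_not]
        exact hk
      rw [hct]
      simp
    · have h1 : (o == k) = false := beq_eq_false_iff_ne.mpr h
      have h2 : (k == o) = false := beq_eq_false_iff_ne.mpr (Ne.symm h)
      rw [h1]
      simp [h2]
      rw [Bool.false_or]

-- one renamed-pairs contribution, as a flatMap over the enumerated mapping
theorem pv_g_eq (fm : List (String × String)) (kv : String × String) :
    (if (pvRev fm).contains kv.1 then ((pvRev fm).getD kv.1 []).map (fun q => (q.1, (q.2, kv.2))) else [])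
      = (PySem.List.enumerate fm).flatMap (fun p => if p.2.2 == kv.1 then [(p.1, (p.2.1, kv.2))] else []) := by
  rw [← pv_filter_map_eq_flatMap]
  by_cases h : (pvRev fm).contains kv.1
  · rw [if_pos h, pv_rev_getD, List.map_map]
    rfl
  · rw [if_neg h]
    have hc : (fm.map Prod.snd).contains kv.1 = false := by
      rw [← pv_rev_contains]; simpa using h
    have hnil : (PySem.List.enumerate fm).filter (fun p => p.2.2 == kv.1) = [] := by
      rw [List.filter_eq_nil_iff]
      intro p hp
      obtain ⟨j, hj, rfl⟩ := (PySem.List.mem_enumerate_iff fm 0 p).mp hp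
      simp only [beq_iff_eq]
      intro he
      have : fm[j].2 ∈ fm.map Prod.snd := List.mem_map_of_mem (List.getElem_mem hj)
      rw [he] at this
      rw [List.contains_eq_mem, decide_eq_false_iff_not] at hc
      exact hc this
    rw [hnil, List.map_nil]

-- the renamed pairs, sorted by position, are the mapping-order list
theorem pv_renamed_sorted (fm item : List (String × String)) (hit : (item.map Prod.fst).Nodup) :
    PySem.List.sorted
      (item.flatMap (fun kv => if (pvRev fm).contains kv.1 then ((pvRev fm).getD kv.1 []).map (fun q => (q.1, (q.2, kv.2))) else []))
      (fun t => t.1)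
    = ((PySem.List.enumerate fm).filter (fun p => (PySem.Dict.mk item).contains p.2.2)).map
        (fun p => (p.1, (p.2.1, (PySem.Dict.mk item).getD p.2.2 ""))) := by
  apply PySem.List.sorted_eq_of_perm_of_pairwise_lt
  · -- the mapping-order list is a permutation of the collected renamed pairs
    have h1 : item.flatMap (fun kv => if (pvRev fm).contains kv.1 then ((pvRev fm).getD kv.1 []).map (fun q => (q.1, (q.2, kv.2))) else [])
        = item.flatMap (fun kv => (PySem.List.enumerate fm).flatMap (fun p => if p.2.2 == kv.1 then [(p.1, (p.2.1, kv.2))] else [])) := by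
      apply List.flatMap_congr
      intro kv _
      exact pv_g_eq fm kv
    have h2 := pv_flatMap_comm_perm item (PySem.List.enumerate fm)
      (fun kv p => if p.2.2 == kv.1 then [(p.1, (p.2.1, kv.2))] else [])
    have h3 : (PySem.List.enumerate fm).flatMap
          (fun p => item.flatMap (fun kv => if p.2.2 == kv.1 then [(p.1, (p.2.1, kv.2))] else []))
        = (PySem.List.enumerate fm).flatMap
          (fun p => if (PySem.Dict.mk item).contains p.2.2 then [(p.1, (p.2.1, (PySem.Dict.mk item).getD p.2.2 ""))] else []) := by
      apply List.flatMap_congr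
      intro p _
      exact pv_flatMap_single item hit p.2.2 (p.1, p.2.1)
    have h4 := pv_filter_map_eq_flatMap (fun p : Int × String × String => (PySem.Dict.mk item).contains p.2.2)
      (fun p : Int × String × String => (p.1, (p.2.1, (PySem.Dict.mk item).getD p.2.2 ""))) (PySem.List.enumerate fm)
    rw [h4, h3.symm]
    exact (h1 ▸ h2).symm
  · -- positions in the enumerated mapping are strictly increasing
    rw [List.pairwise_map]
    exact List.Pairwise.sublist List.filter_sublist (PySem.List.pairwise_lt_enumerate fm 0)

theorem pv_item_eq (fm item : List (String × String)) (hit : (item.map Prod.fst).Nodup) :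
    pvAItem fm item = pvBItem (pvRev fm) item := by
  simp only [pvAItem, pvBItem]
  rw [pv_split_aux (pvRev fm) item ([], []), List.nil_append, List.nil_append,
    pv_renamed_sorted fm item hit]
  dsimp only
  -- the mapped dicts coincide
  have hd1 : fm.foldl (fun d p =>
        if (PySem.Dict.mk item).contains p.2 then d.insert p.1 ((PySem.Dict.mk item).getD p.2 "")
        else d) PySem.Dict.empty
      = PySem.Dict.ofList
          ((((PySem.List.enumerate fm).filter (fun p => (PySem.Dict.mk item).contains p.2.2)).map
            (fun p => (p.1, (p.2.1, (PySem.Dict.mk item).getD p.2.2 "")))).map (fun t => (t.2.1, t.2.2))) := by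
    rw [List.map_map]
    show _ = List.foldl (fun (d : PySem.Dict String String) (q : String × String) => d.insert q.1 q.2) PySem.Dict.empty _
    rw [List.foldl_map]
    have hfm : fm = (PySem.List.enumerate fm).map (fun p => p.2) := by
      rw [PySem.List.map_snd_enumerate]
    conv_lhs => rw [hfm]
    rw [List.foldl_map, ← List.foldl_filter]
    rfl
  rw [hd1]
  -- the pass-through loops coincide
  have hf : item.filter (fun kv => !(pvRev fm).contains kv.1)
      = item.filter (fun kv => !(fm.map Prod.snd).contains kv.1) := by
    apply List.filter_congr
    intro kv _
    rw [pv_rev_contains]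
  rw [← List.foldl_filter, hf]
-- ===== VERDICT (by name: the statement is the Claim_ definition above) =====
theorem standardize_data_format_spec : Claim_equal_standardize_data_format := by
  intro data fm _ hpre
  unfold Spec_standardize_data_format
  unfold standardize_data_format standardize_data_format_alt
  rw [PySem.List.foldl_append_singleton_eq_map (fun item => pvAItem fm item) data [],
      PySem.List.foldl_append_singleton_eq_map (fun item => pvBItem (pvRev fm) item) data []]
  simp only [List.nil_append]
  exact List.map_congr_left (fun item hmem => pv_item_eq fm item (hpre item hmem))
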